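-- pv_equiv track=rewrite | github.com/sebbeutler/BJ_nn | api.py | countCards
-- ===== SOURCE A (Python) =====
-- def countCards(cards):
--     count = 0
--     for card in cards:
--         if card[0] in "AKQJT":
--             count -= 1
--         elif card[0] in "23456":
--             count += 1
--     return count
-- ===== SOURCE B (Python) =====
-- def countCards(cards):
--     c = {}
--     for card in cards:
--         r = card[0]
--         c[r] = c.get(r, 0) + 1
--     return sum(c.get(r, 0) for r in "23456") - sum(c.get(r, 0) for r in "AKQJT")
-- ===== Notes on version B (the rewrite author's own statement) =====
-- stated objective: alternative
-- what changed: B first tabulates a frequency table over each card's leading rank character in one pass, then aggregates the answer by summing the table over the two fixed rank alphabets, replacing A's per-card branching accumulator.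
import Mathlib
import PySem

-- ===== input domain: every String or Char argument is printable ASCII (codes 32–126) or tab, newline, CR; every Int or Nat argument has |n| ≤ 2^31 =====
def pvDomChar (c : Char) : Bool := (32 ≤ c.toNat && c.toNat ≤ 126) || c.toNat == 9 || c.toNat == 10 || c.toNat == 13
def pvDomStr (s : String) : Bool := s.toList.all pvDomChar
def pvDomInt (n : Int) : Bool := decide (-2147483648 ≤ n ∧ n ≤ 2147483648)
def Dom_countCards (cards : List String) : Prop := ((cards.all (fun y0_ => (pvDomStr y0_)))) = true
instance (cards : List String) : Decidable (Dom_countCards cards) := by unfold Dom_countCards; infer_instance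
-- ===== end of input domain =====

-- B replaces A's per-card branching accumulator by a frequency table built in one pass,
-- then aggregated over the two fixed rank alphabets (alternative decomposition, same cost).

-- ===== PORT A =====
-- 'card[0] in "AKQJT"' on a one-character string card[0] is character membership in the rank alphabet.
def countCards (cards : List String) : Int :=
  cards.foldl (fun count card =>
    match PySem.Str.pyGet? card 0 with
    | none => count      -- Python raises IndexError here; excluded by Pre_countCards
    | some ch =>
      if ch ∈ "AKQJT".toList then count - 1
      else if ch ∈ "23456".toList then count + 1
      else count) 0

-- ===== PORT B =====
def countCards_alt (cards : List String) : Int :=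
  let c : PySem.Dict Char Int :=
    cards.foldl (fun d card =>
      match PySem.Str.pyGet? card 0 with
      | none => d        -- Python raises IndexError here; excluded by Pre_countCards
      | some r => d.insert r (d.getD r 0 + 1)) PySem.Dict.empty
  ("23456".toList.map (fun r => c.getD r 0)).sum
    - ("AKQJT".toList.map (fun r => c.getD r 0)).sum

-- ===== PRECONDITION & SPEC =====
-- Pre_ excludes lists containing an empty string: there card[0] raises IndexError in A (and in B).
def Pre_countCards (cards : List String) : Prop := ∀ card ∈ cards, card ≠ ""
instance (cards : List String) : Decidable (Pre_countCards cards) := by unfold Pre_countCards; infer_instance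
def pvWitness_countCards : List String := ["AS", "2H", "9C"]

def Spec_countCards (cards : List String) (out : Int) : Prop := out = countCards_alt cards
instance (cards : List String) (out : Int) : Decidable (Spec_countCards cards out) := by unfold Spec_countCards; infer_instance

-- ===== CLAIM (what is proved, stated in full; the proofs are below) =====
def Claim_equal_countCards : Prop := ∀ (cards : List String), Dom_countCards cards → Pre_countCards cards → Spec_countCards cards (countCards cards)

-- ===== LEMMAS AND PROOFS =====

-- the leading characters of the cards (defined for nonempty cards)
def pvFirsts (cards : List String) : List Char :=
  cards.map (fun card => (PySem.Str.pyGet? card 0).getD ' ')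

lemma pvFirsts_cons (card : String) (rest : List String) :
    pvFirsts (card :: rest) = (PySem.Str.pyGet? card 0).getD ' ' :: pvFirsts rest := rfl

-- score of a multiset of leading characters, expressed over the rank alphabets
def pvScore (l : List Char) : Int :=
  ("23456".toList.map (fun r => (l.count r : Int))).sum
    - ("AKQJT".toList.map (fun r => (l.count r : Int))).sum

lemma pyGet?_zero_of_ne_empty (s : String) (h : s ≠ "") :
    PySem.Str.pyGet? s 0 = some (s.toList.headI) := by
  have hne : s.toList ≠ [] := fun hc => h (by
    have := congrArg String.ofList hc; simpa using this)
  have h0 : PySem.Str.pyGet? s 0 = PySem.List.pyGet? s.toList 0 := by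
    simp [PySem.Str.pyGet?]
  cases hl : s.toList with
  | nil => exact absurd hl hne
  | cons a t => rw [h0, hl, PySem.List.pyGet?_zero_cons]; rfl

lemma sum_count_cons (a : Char) (l : List Char) (rs : List Char) (h : rs.Nodup) :
    (rs.map (fun r => (((a :: l).count r : Nat) : Int))).sum
      = (rs.map (fun r => ((l.count r : Nat) : Int))).sum + (if a ∈ rs then 1 else 0) := by
  induction rs with
  | nil => simp
  | cons r rs ih =>
    have hnd : rs.Nodup := (List.nodup_cons.mp h).2
    have hr : r ∉ rs := (List.nodup_cons.mp h).1
    simp only [List.map_cons, List.sum_cons, List.mem_cons]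
    rw [ih hnd, List.count_cons]
    by_cases hra : a = r
    · subst hra
      simp only [beq_self_eq_true, hr, true_or, if_pos]
      push_cast
      omega
    · simp only [beq_iff_eq, hra, if_false, false_or]
      push_cast
      split_ifs <;> omega

lemma pvScore_cons (a : Char) (l : List Char) :
    pvScore (a :: l) =
      (if a ∈ "AKQJT".toList then pvScore l - 1
       else if a ∈ "23456".toList then pvScore l + 1
       else pvScore l) := by
  have h1 := sum_count_cons a l "23456".toList (by decide)
  have h2 := sum_count_cons a l "AKQJT".toList (by decide)
  unfold pvScore
  rw [h1, h2]
  by_cases m1 : a ∈ "AKQJT".toList <;> by_cases m2 : a ∈ "23456".toList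
  · exfalso
    have e1 : a ∈ ['A','K','Q','J','T'] := m1
    have e2 : a ∈ ['2','3','4','5','6'] := m2
    simp only [List.mem_cons, List.not_mem_nil, or_false] at e1 e2
    rcases e1 with rfl|rfl|rfl|rfl|rfl <;> simp_all
  all_goals simp only [m1, m2, if_true, if_false]
  all_goals ring

lemma countCards_eq_score (cards : List String) (h : Pre_countCards cards) :
    countCards cards = pvScore (pvFirsts cards) := by
  suffices H : ∀ (acc : Int), cards.foldl (fun count card =>
    match PySem.Str.pyGet? card 0 with
    | none => count
    | some ch =>
      if ch ∈ "AKQJT".toList then count - 1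
      else if ch ∈ "23456".toList then count + 1
      else count) acc = acc + pvScore (pvFirsts cards) by
    simpa [countCards] using H 0
  induction cards with
  | nil => intro acc; simp [pvFirsts, pvScore]
  | cons card rest ih =>
    intro acc
    have hcard : card ≠ "" := h card (List.mem_cons_self)
    have hrest : Pre_countCards rest := fun c hc => h c (List.mem_cons_of_mem _ hc)
    simp only [List.foldl_cons, pyGet?_zero_of_ne_empty card hcard, pvFirsts_cons,
      Option.getD_some]
    rw [pvScore_cons, ih hrest]
    split_ifs <;> ring

lemma foldl_dict_eq (cards : List String) (h : Pre_countCards cards) (d : PySem.Dict Char Int) :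
    cards.foldl (fun d card =>
      match PySem.Str.pyGet? card 0 with
      | none => d
      | some r => d.insert r (d.getD r 0 + 1)) d
    = (pvFirsts cards).foldl (fun d r => d.insert r (d.getD r 0 + 1)) d := by
  induction cards generalizing d with
  | nil => simp [pvFirsts]
  | cons card rest ih =>
    have hcard : card ≠ "" := h card (List.mem_cons_self)
    have hrest : Pre_countCards rest := fun c hc => h c (List.mem_cons_of_mem _ hc)
    simp only [List.foldl_cons, pyGet?_zero_of_ne_empty card hcard, pvFirsts_cons,
      Option.getD_some]
    exact ih hrest _

lemma countCards_alt_eq_score (cards : List String) (h : Pre_countCards cards) :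
    countCards_alt cards = pvScore (pvFirsts cards) := by
  unfold countCards_alt
  rw [foldl_dict_eq cards h]
  simp [PySem.Dict.getD_foldl_insert_add_one, pvScore]

-- ===== VERDICT (by name: the statement is the Claim_ definition above) =====
theorem countCards_spec : Claim_equal_countCards := by
  intro cards _ hpre
  unfold Spec_countCards
  rw [countCards_eq_score cards hpre, countCards_alt_eq_score cards hpre]
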